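-- pv_equiv track=rewrite | github.com/jjjake/pubmed-arxivr | archive_pubmed.py | get_doi
-- ===== SOURCE A (Python) =====
-- def get_doi(record):
--     if 'AID' in record:
--         for aid in record['AID']:
--             if 'doi' in aid:
--                 return aid.split()[0].split('/')[-1]
--         for aid in record['AID']:
--             if 'pii' in aid:
--                 return aid.split()[0].split('/')[-1]
-- ===== SOURCE B (Python) =====
-- def _extract(aid):
--     return aid.split()[0].split('/')[-1]
--
--
-- def get_doi(record):
--     # Single pass over record['AID']: return on the first 'doi' aid immediately,
--     # remember the first 'pii' aid as a fallback extracted only at the end.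
--     if 'AID' not in record:
--         return None
--     fallback = None
--     for aid in record['AID']:
--         if 'doi' in aid:
--             return _extract(aid)
--         if 'pii' in aid and fallback is None:
--             fallback = aid
--     return _extract(fallback) if fallback is not None else None
-- ===== Notes on version B (the rewrite author's own statement) =====
-- stated objective: simpler
-- what changed: Replaces A's two sequential scans of record['AID'] (doi pass, then pii pass) with one pass that returns on the first doi match and remembers the first pii aid as a fallback extracted after the loop.
import Mathlib
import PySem

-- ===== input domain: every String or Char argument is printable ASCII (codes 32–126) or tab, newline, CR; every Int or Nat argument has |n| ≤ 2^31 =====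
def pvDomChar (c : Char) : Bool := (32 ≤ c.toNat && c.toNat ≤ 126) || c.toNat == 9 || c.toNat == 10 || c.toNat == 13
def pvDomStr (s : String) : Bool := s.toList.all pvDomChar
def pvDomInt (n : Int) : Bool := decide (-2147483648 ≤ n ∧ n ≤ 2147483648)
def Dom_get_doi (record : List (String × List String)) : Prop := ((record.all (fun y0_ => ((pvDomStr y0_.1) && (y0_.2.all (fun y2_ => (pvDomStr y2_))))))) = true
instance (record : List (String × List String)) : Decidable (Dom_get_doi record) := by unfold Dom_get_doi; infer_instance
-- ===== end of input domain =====

-- B replaces A's two sequential scans of record['AID'] with one pass that returns on the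
-- first 'doi' aid and remembers the first 'pii' aid for extraction after the loop (simpler).


-- ===== PORT A =====
-- aid.split()[0].split('/')[-1]; pyGet? = none exactly where Python raises IndexError,
-- which is unreachable here (the aid contains 'doi'/'pii', hence a non-whitespace word).
def pvExtract (aid : String) : Option String :=
  match PySem.List.pyGet? (PySem.Str.split₀ aid) 0 with
  | none => none
  | some w =>
    match PySem.Str.split? w "/" with
    | none => none
    | some parts => PySem.List.pyGet? parts (-1)

-- one 'for aid in aids: if sub in aid: return extract(aid)' loop; outer none = fell through
def pvScanA (sub : String) : List String → Option (Option String)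
  | [] => none
  | a :: rest => if PySem.Str.isIn sub a then some (pvExtract a) else pvScanA sub rest

def get_doi (record : List (String × List String)) : Option String :=
  match PySem.Dict.get? ⟨record⟩ "AID" with
  | none => none
  | some aids =>
    match pvScanA "doi" aids with
    | some r => r
    | none =>
      match pvScanA "pii" aids with
      | some r => r
      | none => none

-- ===== PORT B =====
def pvLoopB : List String → Option String → Option String
  | [], fb => match fb with
              | some p => pvExtract p
              | none => none
  | a :: rest, fb =>
    if PySem.Str.isIn "doi" a then pvExtract a
    else pvLoopB rest (if PySem.Str.isIn "pii" a ∧ fb = none then some a else fb)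

def get_doi_alt (record : List (String × List String)) : Option String :=
  match PySem.Dict.get? ⟨record⟩ "AID" with
  | none => none
  | some aids => pvLoopB aids none

-- ===== PRECONDITION & SPEC =====
def Spec_get_doi (record : List (String × List String)) (out : Option String) : Prop := out = get_doi_alt record
instance (record : List (String × List String)) (out : Option String) : Decidable (Spec_get_doi record out) := by unfold Spec_get_doi; infer_instance

-- ===== CLAIM (what is proved, stated in full; the proofs are below) =====
def Claim_equal_get_doi : Prop := ∀ (record : List (String × List String)), Dom_get_doi record → Spec_get_doi record (get_doi record)

-- ===== LEMMAS AND PROOFS =====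

-- single pass with fallback = doi pass, then stored/first pii
theorem pvLoopB_eq (aids : List String) (fb : Option String) :
    pvLoopB aids fb =
      match pvScanA "doi" aids with
      | some r => r
      | none =>
        match fb with
        | some p => pvExtract p
        | none =>
          match pvScanA "pii" aids with
          | some r => r
          | none => none := by
  induction aids generalizing fb with
  | nil => rfl
  | cons a rest ih =>
    simp only [pvLoopB, pvScanA, PySem.Str.isIn_eq]
    by_cases hd : PySem.Chars.isIn ['d', 'o', 'i'] a.toList = true
    · simp [hd]
    · by_cases hp : PySem.Chars.isIn ['p', 'i', 'i'] a.toList = true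
      · cases fb with
        | none => simp [hd, hp, ih]
        | some p => simp [hd, hp, ih]
      · cases fb with
        | none => simp [hd, hp, ih]
        | some p => simp [hd, hp, ih]

-- ===== VERDICT (by name: the statement is the Claim_ definition above) =====
theorem get_doi_spec : Claim_equal_get_doi := by
  intro record _
  unfold Spec_get_doi get_doi get_doi_alt
  cases PySem.Dict.get? ⟨record⟩ "AID" with
  | none => rfl
  | some aids => simp [pvLoopB_eq]
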